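-- pv_equiv track=rewrite | github.com/BehrozRazaq/AoC2025 | 2/B.py | check_val
-- ===== SOURCE A (Python) =====
-- def check_val(number):
--     number = str(number)
--     size = len(number)
--     sizes = range(2, size + 1)
--     for mod in sizes:
--         if not (size % mod == 0):
--             continue
--         delta = int(size / mod)
--         divs = [number[i : i + delta] for i in range(0, size, delta)]
--
--         pre = divs[0]
--
--         for div in divs[1:]:
--             if not div == pre:
--                 break
--             pre = div
--         else:
--             return False
--     return True
-- ===== SOURCE B (Python) =====
-- def check_val(number):
--     s = str(number)
--     n = len(s)
--     return not any(n % d == 0 and s[:d] * (n // d) == s for d in range(1, n))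
-- ===== Notes on version B (the rewrite author's own statement) =====
-- stated objective: idiomatic
-- what changed: B replaces A's nested loops (split the digit string into blocks for every divisor and compare blocks pairwise) by a single any() over block lengths that tests s[:d] * (n // d) == s, i.e. rebuild-by-repetition instead of chunk-and-compare.
import Mathlib
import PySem

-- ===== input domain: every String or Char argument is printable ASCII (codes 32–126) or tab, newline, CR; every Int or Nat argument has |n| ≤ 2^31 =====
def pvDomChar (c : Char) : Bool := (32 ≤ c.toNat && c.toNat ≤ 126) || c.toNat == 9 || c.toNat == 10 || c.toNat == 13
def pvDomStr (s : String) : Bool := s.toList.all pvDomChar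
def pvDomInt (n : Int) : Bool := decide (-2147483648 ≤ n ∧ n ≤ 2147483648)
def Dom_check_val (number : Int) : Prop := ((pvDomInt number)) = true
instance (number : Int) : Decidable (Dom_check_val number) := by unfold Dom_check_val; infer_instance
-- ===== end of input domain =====

-- B tests s[:d] * (n // d) == s over block lengths d instead of A's chunk-and-compare loops (idiomatic rewrite, same cost).

-- ===== PORT A =====
-- inner 'for div in divs[1:]' loop with its running 'pre'; true iff the loop finishes without break (the for-else fires)
def checkA_inner (pre : List Char) : List (List Char) → Bool
  | [] => true
  | d :: rest => if d == pre then checkA_inner d rest else false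

-- outer 'for mod in sizes' loop; 'return False' when the for-else fires, fall through to True
def checkA_loop (s : List Char) (size : Int) : List Int → Bool
  | [] => true
  | m :: rest =>
    if PySem.Int.mod size m == 0 then
      -- int(size / mod): exact here (mod divides size, both positive and small), ported as floor division
      let delta := PySem.Int.floordiv size m
      let divs := (PySem.List.pyRange 0 size delta).map
        (fun i => PySem.List.slice s (some i) (some (i + delta)))
      -- divs[0]: divs is nonempty whenever this branch runs (size ≥ mod ≥ 2), so the [] default is never used
      let pre := (PySem.List.pyGet? divs 0).getD []
      if checkA_inner pre (PySem.List.slice divs (some 1) none) then false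
      else checkA_loop s size rest
    else checkA_loop s size rest

def check_val (number : Int) : Bool :=
  let s := (PySem.Int.toStr number).toList
  let size := PySem.List.len s
  checkA_loop s size (PySem.List.pyRange 2 (size + 1) 1)

-- ===== PORT B =====
def check_val_alt (number : Int) : Bool :=
  let s := (PySem.Int.toStr number).toList
  let n := PySem.List.len s
  -- 's[:d] * (n // d) == s' on code points: list slice, pyRepeat, floor division
  !((PySem.List.pyRange 1 n 1).any (fun d =>
      PySem.Int.mod n d == 0 &&
      PySem.List.pyRepeat (PySem.List.slice s none (some d)) (PySem.Int.floordiv n d) == s))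

-- ===== PRECONDITION & SPEC =====
def Spec_check_val (number : Int) (out : Bool) : Prop := out = check_val_alt number
instance (number : Int) (out : Bool) : Decidable (Spec_check_val number out) := by unfold Spec_check_val; infer_instance

-- ===== CLAIM (what is proved, stated in full; the proofs are below) =====
def Claim_equal_check_val : Prop := ∀ (number : Int), Dom_check_val number → Spec_check_val number (check_val number)

-- ===== LEMMAS AND PROOFS =====

-- cast helpers for Python's floor division and modulo on nonnegative arguments
theorem floordiv_natCast (a b : Nat) : PySem.Int.floordiv (a:Int) (b:Int) = ((a / b : Nat) : Int) := by
  rw [PySem.Int.floordiv, Int.fdiv_eq_ediv, Int.natCast_div]; simp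

theorem mod_natCast (a b : Nat) : PySem.Int.mod (a:Int) (b:Int) = ((a % b : Nat) : Int) := by
  rw [PySem.Int.mod, Int.fmod_eq_emod, Int.natCast_mod]; simp

-- the body of A's outer loop for one candidate block count m, as a predicate
def goodA (s : List Char) (size : Int) (m : Int) : Bool :=
  PySem.Int.mod size m == 0 &&
    (let delta := PySem.Int.floordiv size m
     let divs := (PySem.List.pyRange 0 size delta).map
       (fun i => PySem.List.slice s (some i) (some (i + delta)))
     checkA_inner ((PySem.List.pyGet? divs 0).getD []) (PySem.List.slice divs (some 1) none))

-- the body of B's any(), as a predicate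
def goodB (s : List Char) (n : Int) (d : Int) : Bool :=
  PySem.Int.mod n d == 0 &&
  PySem.List.pyRepeat (PySem.List.slice s none (some d)) (PySem.Int.floordiv n d) == s

theorem inner_eq_all (ds : List (List Char)) : ∀ pre, checkA_inner pre ds = ds.all (· == pre) := by
  induction ds with
  | nil => intro pre; rfl
  | cons d rest ih =>
    intro pre
    by_cases h : d = pre
    · subst h; simp [checkA_inner, ih d]
    · simp [checkA_inner, h]

theorem loop_eq_any (s : List Char) (size : Int) (ms : List Int) :
    checkA_loop s size ms = !(ms.any (goodA s size)) := by
  induction ms with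
  | nil => rfl
  | cons m rest ih =>
    show (if PySem.Int.mod size m == 0 then _ else _) = _
    by_cases h : PySem.Int.mod size m == 0
    · rw [if_pos h]
      simp only [goodA, h, Bool.true_and, List.any_cons]
      split
      · next h2 => simp [h2]
      · next h2 => simp [h2, ih]
    · rw [if_neg h]
      simp [goodA, h, ih]

-- pyRange 0 (dd*mm) dd is the list of block starts dd*k, k < mm
theorem pyRange_step (dd mm : Nat) (hd : 0 < dd) :
    PySem.List.pyRange 0 ((dd * mm : Nat) : Int) ((dd : Nat) : Int) =
      (List.range mm).map (fun k => ((dd * k : Nat) : Int)) := by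
  have hds : (0:Int) < (dd:Int) := by exact_mod_cast hd
  rw [PySem.List.pyRange_of_pos 0 _ hds]
  have hcount : (if (0:Int) < ((dd * mm : Nat) : Int) then
      (((((dd * mm : Nat) : Int) - 0 + (dd:Int) - 1) / (dd:Int)).toNat) else (0:Nat)) = mm := by
    rcases Nat.eq_zero_or_pos mm with rfl | hm
    · simp
    · have hpos : (0:Int) < ((dd * mm : Nat) : Int) := by exact_mod_cast Nat.mul_pos hd hm
      rw [if_pos hpos]
      have h1 : (((dd * mm : Nat) : Int) - 0 + (dd:Int) - 1) = ((dd * mm + (dd - 1) : Nat) : Int) := by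
        push_cast [hd]; omega
      rw [h1, ← Int.natCast_div, Nat.mul_add_div hd, Nat.div_eq_of_lt (by omega)]
      simp
  rw [hcount]
  refine List.map_congr_left (fun k _ => ?_)
  push_cast; ring

-- blocks-all-equal ↔ the list is the block repeated
theorem chunks_iff_repeat (dd : Nat) (b : List Char) (hb : b.length = dd) :
    ∀ (mm : Nat) (l : List Char), l.length = dd * mm →
      ((∀ k < mm, (l.drop (dd * k)).take dd = b) ↔ l = (List.replicate mm b).flatten) := by
  intro mm
  induction mm with
  | zero =>
    intro l hl
    simp only [Nat.mul_zero] at hl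
    simp [List.eq_nil_of_length_eq_zero hl]
  | succ n ih =>
    intro l hl
    have hlen : l.length = dd + dd * n := by rw [hl]; ring
    have hdl : dd ≤ l.length := by omega
    have hdrop : (l.drop dd).length = dd * n := by simp [hlen]
    constructor
    · intro H
      have h0 : l.take dd = b := by simpa using H 0 (Nat.succ_pos n)
      have hrest : l.drop dd = (List.replicate n b).flatten := by
        refine (ih (l.drop dd) hdrop).mp (fun k hk => ?_)
        have := H (k + 1) (by omega)
        have hidx : dd * (k + 1) = dd + dd * k := by ring
        rw [← this, List.drop_drop, hidx]
      calc l = l.take dd ++ l.drop dd := (List.take_append_drop dd l).symm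
        _ = b ++ (List.replicate n b).flatten := by rw [h0, hrest]
        _ = (List.replicate (n+1) b).flatten := by simp [List.replicate_succ]
    · intro H
      have h0 : l.take dd = b := by
        rw [H]; simp [List.replicate_succ]
        rw [List.take_append_of_le_length (by omega)]
        simp [hb]
      have hdropb : l.drop dd = (List.replicate n b).flatten := by
        have : l = b ++ (List.replicate n b).flatten := by
          rw [H]; simp [List.replicate_succ]
        rw [this, List.drop_append_of_le_length (by omega)]
        simp [hb]
      intro k hk
      rcases Nat.eq_zero_or_pos k with rfl | hkpos
      · simpa using h0
      · obtain ⟨k', rfl⟩ := Nat.exists_eq_succ_of_ne_zero (Nat.pos_iff_ne_zero.mp hkpos)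
        have := (ih (l.drop dd) hdrop).mpr hdropb k' (by omega)
        have hidx : dd * (k' + 1) = dd + dd * k' := by ring
        rw [List.drop_drop] at this
        rw [← this, hidx]

theorem goodA_iff (l : List Char) (m : Int) (h2 : 2 ≤ m) (hle : m ≤ (l.length : Int)) :
    goodA l (l.length : Int) m = true ↔
      (m.toNat ∣ l.length ∧
       l = (List.replicate m.toNat (l.take (l.length / m.toNat))).flatten) := by
  obtain ⟨mm, hm⟩ : ∃ mm : Nat, (mm : Int) = m := ⟨m.toNat, Int.toNat_of_nonneg (by omega)⟩
  have htn : m.toNat = mm := by omega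
  rw [htn]
  have hmm2 : 2 ≤ mm := by omega
  have hmle : mm ≤ l.length := by omega
  rw [goodA, ← hm, mod_natCast]
  by_cases hdvd : mm ∣ l.length
  · have hmodz : (((l.length % mm : Nat) : Int) == 0) = true := by
      simp [Nat.mod_eq_zero_of_dvd hdvd]
    rw [floordiv_natCast]
    obtain ⟨dd, hdd⟩ : ∃ dd : Nat, l.length / mm = dd := ⟨_, rfl⟩
    rw [hdd]
    have hdpos : 0 < dd := hdd ▸ Nat.div_pos hmle (by omega)
    have hnd : dd * mm = l.length := by
      rw [← hdd, Nat.div_mul_cancel hdvd]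
    have hrange : PySem.List.pyRange 0 (l.length : Int) ((dd : Nat) : Int) =
        (List.range mm).map (fun k => ((dd * k : Nat) : Int)) := by
      rw [← hnd]; exact pyRange_step dd mm hdpos
    simp only [hmodz, Bool.true_and]
    rw [hrange, List.map_map]
    have hmap : (List.range mm).map ((fun i => PySem.List.slice l (some i) (some (i + ((dd:Nat):Int)))) ∘ (fun k => ((dd * k : Nat) : Int))) =
        (List.range mm).map (fun k => (l.drop (dd * k)).take dd) := by
      refine List.map_congr_left (fun k _ => ?_)
      simp only [Function.comp]
      exact_mod_cast PySem.List.slice_natCast_add l (dd * k) dd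
    rw [hmap]
    have hddle : dd ≤ l.length := hnd ▸ Nat.le_mul_of_pos_right dd (by omega)
    have hb : (l.take dd).length = dd := by
      simp [List.length_take]
      omega
    have hchar := chunks_iff_repeat dd (l.take dd) hb mm l (by omega)
    -- expose the head of the chunk list
    obtain ⟨n', hn'⟩ : ∃ n', mm = n' + 1 := ⟨mm - 1, by omega⟩
    subst hn'
    rw [List.range_succ_eq_map]
    simp only [List.map_cons, List.map_map, Nat.mul_zero, List.drop_zero]
    rw [PySem.List.pyGet?_zero, PySem.List.slice_from_one]
    simp only [List.getElem?_cons_zero, Option.getD_some, List.tail_cons]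
    rw [inner_eq_all]
    constructor
    · intro hall
      refine ⟨hdvd, ?_⟩
      refine hchar.mp (fun k hk => ?_)
      rcases Nat.eq_zero_or_pos k with rfl | hkpos
      · simp
      · obtain ⟨k', rfl⟩ := Nat.exists_eq_succ_of_ne_zero (Nat.pos_iff_ne_zero.mp hkpos)
        have := List.all_eq_true.mp hall ((l.drop (dd * (k' + 1))).take dd) ?_
        · simpa using this
        · simp only [List.mem_map, List.mem_range, Function.comp, Nat.succ_eq_add_one]
          exact ⟨k', by omega, by simp⟩
    · rintro ⟨-, hrep⟩
      have hall := hchar.mpr hrep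
      refine List.all_eq_true.mpr (fun x hx => ?_)
      simp only [List.mem_map, List.mem_range, Function.comp, Nat.succ_eq_add_one] at hx
      obtain ⟨k, hk, rfl⟩ := hx
      simpa [Nat.succ_eq_add_one] using hall (k + 1) (by omega)
  · have hmodz : (((l.length % mm : Nat) : Int) == 0) = false := by
      rw [beq_eq_false_iff_ne]
      exact_mod_cast fun h => hdvd (Nat.dvd_of_mod_eq_zero h)
    rw [hmodz]
    simp [hdvd]

theorem goodB_iff (l : List Char) (d : Int) (h1 : 1 ≤ d) :
    goodB l (l.length : Int) d = true ↔
      (d.toNat ∣ l.length ∧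
       l = (List.replicate (l.length / d.toNat) (l.take d.toNat)).flatten) := by
  obtain ⟨dd, hd⟩ : ∃ dd : Nat, (dd : Int) = d := ⟨d.toNat, Int.toNat_of_nonneg (by omega)⟩
  have htn : d.toNat = dd := by omega
  rw [htn, goodB, ← hd, mod_natCast, floordiv_natCast, PySem.List.slice_to_natCast]
  by_cases hdvd : dd ∣ l.length
  · have hmodz : (((l.length % dd : Nat) : Int) == 0) = true := by
      simp [Nat.mod_eq_zero_of_dvd hdvd]
    rw [hmodz]
    simp only [Bool.true_and, PySem.List.pyRepeat, Int.toNat_natCast, beq_iff_eq]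
    exact ⟨fun h => ⟨hdvd, h.symm⟩, fun h => h.2.symm⟩
  · have hmodz : (((l.length % dd : Nat) : Int) == 0) = false := by
      rw [beq_eq_false_iff_ne]
      exact_mod_cast fun h => hdvd (Nat.dvd_of_mod_eq_zero h)
    rw [hmodz]
    simp [hdvd]

-- the divisor bijection: block counts m ∈ [2, n] ↔ block lengths d ∈ [1, n)
theorem any_goodA_eq_any_goodB (l : List Char) :
    (PySem.List.pyRange 2 ((l.length : Int) + 1) 1).any (goodA l (l.length : Int)) =
    (PySem.List.pyRange 1 (l.length : Int) 1).any (goodB l (l.length : Int)) := by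
  rw [Bool.eq_iff_iff, List.any_eq_true, List.any_eq_true]
  constructor
  · rintro ⟨m, hmem, hgood⟩
    obtain ⟨h2, hlt⟩ := PySem.List.mem_pyRange_one.mp hmem
    have hle : m ≤ (l.length : Int) := by omega
    obtain ⟨hdvd, hrep⟩ := (goodA_iff l m h2 hle).mp hgood
    obtain ⟨mm, hm⟩ : ∃ mm : Nat, (mm : Int) = m := ⟨m.toNat, Int.toNat_of_nonneg (by omega)⟩
    have htn : m.toNat = mm := by omega
    rw [htn] at hdvd hrep
    have hmle : mm ≤ l.length := by omega
    have hdpos : 0 < l.length / mm := Nat.div_pos hmle (by omega)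
    have hdlt : l.length / mm < l.length := Nat.div_lt_self (by omega) (by omega)
    refine ⟨((l.length / mm : Nat) : Int),
      PySem.List.mem_pyRange_one.mpr ⟨by exact_mod_cast hdpos, by exact_mod_cast hdlt⟩, ?_⟩
    rw [goodB_iff l _ (by exact_mod_cast hdpos), Int.toNat_natCast]
    refine ⟨Nat.div_dvd_of_dvd hdvd, ?_⟩
    rw [Nat.div_div_self hdvd (by omega)]
    exact hrep
  · rintro ⟨d, hmem, hgood⟩
    obtain ⟨h1, hlt⟩ := PySem.List.mem_pyRange_one.mp hmem
    obtain ⟨hdvd, hrep⟩ := (goodB_iff l d h1).mp hgood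
    obtain ⟨dd, hd⟩ : ∃ dd : Nat, (dd : Int) = d := ⟨d.toNat, Int.toNat_of_nonneg (by omega)⟩
    have htn : d.toNat = dd := by omega
    rw [htn] at hdvd hrep
    have hdlt : dd < l.length := by omega
    have hq : (l.length / dd) * dd = l.length := Nat.div_mul_cancel hdvd
    have hqpos : 0 < l.length / dd := Nat.div_pos (by omega) (by omega)
    have hmm2 : 2 ≤ l.length / dd := by
      by_contra hcon
      have h1' : l.length / dd = 1 := by omega
      rw [h1', one_mul] at hq
      omega
    refine ⟨((l.length / dd : Nat) : Int),
      PySem.List.mem_pyRange_one.mpr ⟨by exact_mod_cast hmm2,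
        by exact_mod_cast Nat.lt_succ_of_le (Nat.div_le_self _ _)⟩, ?_⟩
    rw [goodA_iff l _ (by exact_mod_cast hmm2) (by exact_mod_cast Nat.div_le_self _ _),
      Int.toNat_natCast]
    refine ⟨Nat.div_dvd_of_dvd hdvd, ?_⟩
    rw [Nat.div_div_self hdvd (by omega)]
    exact hrep

-- ===== VERDICT (by name: the statement is the Claim_ definition above) =====
theorem check_val_spec : Claim_equal_check_val := by
  intro number _
  unfold Spec_check_val check_val check_val_alt
  simp only [PySem.List.len_eq]
  rw [loop_eq_any]
  rw [show (fun d => PySem.Int.mod ((((PySem.Int.toStr number).toList.length : Nat)) : Int) d == 0 &&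
        PySem.List.pyRepeat (PySem.List.slice (PySem.Int.toStr number).toList none (some d))
          (PySem.Int.floordiv (((PySem.Int.toStr number).toList.length : Nat) : Int) d) == (PySem.Int.toStr number).toList) =
      goodB (PySem.Int.toStr number).toList (((PySem.Int.toStr number).toList.length : Nat) : Int) from rfl]
  rw [any_goodA_eq_any_goodB]
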